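-- pv_equiv track=rewrite | github.com/fatinecheddad/SearchEngine | tokenizer.py | vecteurs_queries
-- ===== SOURCE A (Python) =====
-- def liste_voc(dico_voc):
--   liste=[]
--   for elt in dico_voc:
--     liste.append(elt)
--   return liste
--
-- def vecteurs_queries(queries,vocDoc):
--   voc = liste_voc(vocDoc)
--   result = [[0 for i in range(len(voc))] for i in range(len(queries)-1)]
--   for i in range(1,len(queries)):
--     requete=queries[i]
--     for mot in requete:
--       if mot in voc:
--         indice = voc.index(mot)
--         result[i-1][indice]=1
--   return result
-- ===== SOURCE B (Python) =====
-- def vecteurs_queries(queries, vocDoc):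
--     voc = list(vocDoc)
--     rows = []
--     for requete in queries[1:]:
--         words = set(requete)
--         rows.append([1 if terme in words else 0 for terme in voc])
--     return rows
-- ===== Notes on version B (the rewrite author's own statement) =====
-- stated objective: idiomatic
-- what changed: B inverts the nested loops: instead of scanning each query's words and writing 1 at voc.index(mot) into a pre-built zero matrix, B builds each row directly as a comprehension over the vocabulary testing set membership of the query's words, eliminating the repeated linear voc.index scans.
import Mathlib
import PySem

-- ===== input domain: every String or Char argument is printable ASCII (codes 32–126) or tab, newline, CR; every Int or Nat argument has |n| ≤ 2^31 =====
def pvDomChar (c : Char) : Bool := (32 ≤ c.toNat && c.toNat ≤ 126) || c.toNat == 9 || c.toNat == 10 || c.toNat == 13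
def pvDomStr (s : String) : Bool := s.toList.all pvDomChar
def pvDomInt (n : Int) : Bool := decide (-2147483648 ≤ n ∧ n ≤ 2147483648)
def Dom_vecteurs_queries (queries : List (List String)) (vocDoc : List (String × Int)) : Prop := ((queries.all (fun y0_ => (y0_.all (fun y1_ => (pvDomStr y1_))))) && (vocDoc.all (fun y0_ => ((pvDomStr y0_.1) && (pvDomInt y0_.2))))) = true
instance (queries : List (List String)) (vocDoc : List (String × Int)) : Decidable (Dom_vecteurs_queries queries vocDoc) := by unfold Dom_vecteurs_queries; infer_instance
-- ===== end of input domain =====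

-- B builds each output row directly as a map over the vocabulary with a set-membership test,
-- instead of A's index-writes (voc.index per word) into a pre-built zero matrix (idiomatic, avoids the inner voc scans).


-- ===== PORT A =====
-- 'for elt in dico_voc' iterates the dict's keys (each once, insertion order): PySem.List.dedup of the key list
def liste_voc (dico_voc : List (String × Int)) : List String :=
  (PySem.List.dedup (dico_voc.map Prod.fst)).foldl (fun liste elt => liste ++ [elt]) []

def vecteurs_queries (queries : List (List String)) (vocDoc : List (String × Int)) : List (List Int) :=
  let voc := liste_voc vocDoc
  let result : List (List Int) :=
    (PySem.List.pyRange 0 ((queries.length : Int) - 1) 1).map (fun _ =>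
      (PySem.List.pyRange 0 (voc.length : Int) 1).map (fun _ => (0 : Int)))
  (PySem.List.pyRange 1 (queries.length : Int) 1).foldl (fun result i =>
    let requete := PySem.List.pyGetD queries i []
    requete.foldl (fun result mot =>
      if voc.contains mot then
        let indice : Nat := (PySem.List.index? voc mot).getD 0
        PySem.List.pySetD result (i - 1)
          (PySem.List.pySetD (PySem.List.pyGetD result (i - 1) []) (indice : Int) 1)
      else result) result) result

-- ===== PORT B =====
def vecteurs_queries_alt (queries : List (List String)) (vocDoc : List (String × Int)) : List (List Int) :=
  let voc := PySem.List.dedup (vocDoc.map Prod.fst)      -- list(vocDoc) = the dict's keys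
  (PySem.List.slice queries (some 1) none).foldl (fun rows requete =>
    let words := PySem.Set.ofList requete
    rows ++ [voc.map (fun terme => if PySem.Set.contains words terme then (1 : Int) else 0)]) []

-- ===== PRECONDITION & SPEC =====
def Spec_vecteurs_queries (queries : List (List String)) (vocDoc : List (String × Int)) (out : List (List Int)) : Prop := out = vecteurs_queries_alt queries vocDoc
instance (queries : List (List String)) (vocDoc : List (String × Int)) (out : List (List Int)) : Decidable (Spec_vecteurs_queries queries vocDoc out) := by unfold Spec_vecteurs_queries; infer_instance

-- ===== CLAIM (what is proved, stated in full; the proofs are below) =====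
def Claim_equal_vecteurs_queries : Prop := ∀ (queries : List (List String)) (vocDoc : List (String × Int)), Dom_vecteurs_queries queries vocDoc → Spec_vecteurs_queries queries vocDoc (vecteurs_queries queries vocDoc)

-- ===== LEMMAS AND PROOFS =====
lemma set_map_index (voc : List String) (hnd : voc.Nodup) (mot : String) (hm : mot ∈ voc)
    (f0 : String → Int) :
    (voc.map f0).set ((PySem.List.index? voc mot).getD 0) 1
      = voc.map (fun t => if t = mot then 1 else f0 t) := by
  induction voc generalizing f0 with
  | nil => cases hm
  | cons v vs ih =>
    rcases List.nodup_cons.mp hnd with ⟨hv, hnd'⟩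
    by_cases hvm : v = mot
    · subst hvm
      rw [PySem.List.index?_cons_self]
      simp only [Option.getD_some, List.map_cons, List.set_cons_zero]
      congr 1
      exact (List.map_congr_left (fun t ht => by
        have : t ≠ v := fun h => hv (h ▸ ht)
        simp [this])).symm
    · have hm' : mot ∈ vs := by
        rcases List.mem_cons.mp hm with h | h
        · exact absurd h.symm hvm
        · exact h
      rw [PySem.List.index?_cons_of_ne vs hvm]
      have hsome : ∃ k, PySem.List.index? vs mot = some k := by
        have := PySem.List.index?_isSome_iff (xs := vs) (v := mot)
        rcases Option.isSome_iff_exists.mp (this.mpr hm') with ⟨k, hk⟩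
        exact ⟨k, hk⟩
      rcases hsome with ⟨k, hk⟩
      simp only [hk, Option.map_some, Option.getD_some, List.map_cons, List.set_cons_succ]
      have := ih hnd' hm' f0
      rw [hk] at this
      simp only [Option.getD_some] at this
      rw [this]
      simp [hvm]

lemma rowfill (voc : List String) (hnd : voc.Nodup) (q : List String) (f0 : String → Int) :
    q.foldl (fun r mot =>
        if voc.contains mot then
          PySem.List.pySetD r (((PySem.List.index? voc mot).getD 0 : Nat) : Int) 1
        else r) (voc.map f0)
      = voc.map (fun t => if t ∈ q then 1 else f0 t) := by
  induction q generalizing f0 with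
  | nil => simp
  | cons mot rest ih =>
    simp only [List.foldl_cons]
    by_cases hm : mot ∈ voc
    · rw [if_pos (by simpa using hm), PySem.List.pySetD_natCast,
        set_map_index voc hnd mot hm f0, ih (fun t => if t = mot then 1 else f0 t)]
      apply List.map_congr_left; intro t ht
      by_cases h1 : t ∈ rest <;> by_cases h2 : t = mot <;> simp [h1, h2]
    · rw [if_neg (by simpa using hm), ih f0]
      apply List.map_congr_left; intro t ht
      have hne : t ≠ mot := fun h => hm (h ▸ ht)
      simp [hne]

-- within one outer iteration only row j is read and written
lemma matrix_inner (voc : List String) (q : List String) (res : List (List Int)) (j : Nat)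
    (hj : j < res.length) :
    q.foldl (fun res mot =>
        if voc.contains mot then
          PySem.List.pySetD res ((j : Nat) : Int)
            (PySem.List.pySetD (PySem.List.pyGetD res ((j : Nat) : Int) [])
              (((PySem.List.index? voc mot).getD 0 : Nat) : Int) 1)
        else res) res
      = PySem.List.pySetD res ((j : Nat) : Int)
          (q.foldl (fun r mot =>
              if voc.contains mot then
                PySem.List.pySetD r (((PySem.List.index? voc mot).getD 0 : Nat) : Int) 1
              else r)
            (PySem.List.pyGetD res ((j : Nat) : Int) [])) := by
  induction q generalizing res with
  | nil =>
    simp only [List.foldl_nil, PySem.List.pySetD_natCast, PySem.List.pyGetD_natCast]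
    rw [List.getD_eq_getElem _ _ hj]
    exact (List.set_getElem_self hj).symm
  | cons mot rest ih =>
    simp only [List.foldl_cons]
    by_cases hc : voc.contains mot
    · rw [if_pos hc, if_pos hc]
      rw [ih _ (by simp [hj])]
      simp only [PySem.List.pySetD_natCast, PySem.List.pyGetD_natCast]
      rw [List.set_set]
      congr 1
      rw [List.getD_eq_getElem _ _ (by simp [hj]), List.getElem_set_self,
        List.getD_eq_getElem _ _ hj]
    · rw [if_neg hc, if_neg hc, ih _ hj]

lemma outer (queries : List (List String)) (voc : List String) (hnd : voc.Nodup)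
    (n : Nat) (hn : queries.length = n + 1) (k : Nat) (hk : k ≤ n) :
    (PySem.List.pyRange 1 (1 + (k : Int)) 1).foldl
      (fun result i =>
        (PySem.List.pyGetD queries i []).foldl (fun result mot =>
          if voc.contains mot then
            PySem.List.pySetD result (i - 1)
              (PySem.List.pySetD (PySem.List.pyGetD result (i - 1) [])
                (((PySem.List.index? voc mot).getD 0 : Nat) : Int) 1)
          else result) result)
      (List.replicate n (voc.map (fun _ => (0 : Int))))
    = ((queries.drop 1).take k).map (fun q => voc.map (fun t => if t ∈ q then 1 else 0))
        ++ List.replicate (n - k) (voc.map (fun _ => (0 : Int))) := by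
  induction k with
  | zero => simp [PySem.List.pyRange_one_eq_nil (by norm_num : (1:Int) ≤ 1)]
  | succ k ih =>
    have hk' : k ≤ n := Nat.le_of_succ_le hk
    have hcast : (1 : Int) + ((k+1 : Nat) : Int) = (1 + (k : Int)) + 1 := by push_cast; ring
    rw [hcast, PySem.List.pyRange_one_succ_right (by omega), List.foldl_append, ih hk']
    set S := ((queries.drop 1).take k).map (fun q => voc.map (fun t => if t ∈ q then 1 else 0))
        ++ List.replicate (n - k) (voc.map (fun _ => (0 : Int))) with hS
    have hlenA : ((queries.drop 1).take k).length = k := by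
      simp [hn]; omega
    have hlenS : S.length = n := by
      simp [hS, List.length_take, hn]
      omega
    simp only [List.foldl_cons, List.foldl_nil]
    have h1k : (1 : Int) + (k : Int) = ((k+1 : Nat) : Int) := by push_cast; ring
    rw [h1k]
    simp only [show ((k+1 : Nat) : Int) - 1 = ((k : Nat) : Int) by push_cast; ring]
    rw [matrix_inner voc _ S k (by rw [hlenS]; omega)]
    have hq : PySem.List.pyGetD queries ((k+1 : Nat) : Int) [] = queries.getD (k+1) [] :=
      PySem.List.pyGetD_natCast _ _ _
    have hrow : PySem.List.pyGetD S ((k : Nat) : Int) [] = voc.map (fun _ => (0 : Int)) := by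
      rw [PySem.List.pyGetD_natCast, hS, List.getD_eq_getElem?_getD,
        List.getElem?_append_right (by simp only [List.length_map, hlenA]; omega)]
      rw [List.length_map, hlenA, Nat.sub_self, List.getElem?_replicate_of_lt (by omega)]
      rfl
    rw [hq, hrow, rowfill voc hnd _ _]
    rw [PySem.List.pySetD_natCast, hS]
    rw [List.set_append_right _ _ (by simp only [List.length_map, hlenA]; omega)]
    have hnk : n - k = (n - (k+1)) + 1 := by omega
    rw [List.length_map, hlenA, Nat.sub_self, hnk, List.replicate_succ, List.set_cons_zero]
    have htake : (queries.drop 1).take (k+1)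
        = (queries.drop 1).take k ++ [queries.getD (k+1) []] := by
      rw [List.take_add_one]
      congr 1
      rw [List.getElem?_drop, List.getD_eq_getElem _ _ (by omega)]
      rw [List.getElem?_eq_getElem (by omega)]
      simp [Nat.add_comm]
    rw [htake, List.map_append, List.append_assoc]
    simp

lemma ofList_contains (q : List String) (t : String) :
    PySem.Set.contains (PySem.Set.ofList q) t = decide (t ∈ q) := by simp [pysem]

-- ===== VERDICT (by name: the statement is the Claim_ definition above) =====
theorem vecteurs_queries_spec : Claim_equal_vecteurs_queries := by
  intro queries vocDoc _
  unfold Spec_vecteurs_queries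
  simp only [vecteurs_queries, vecteurs_queries_alt, liste_voc,
    PySem.List.foldl_append_singleton_eq_self, List.nil_append,
    PySem.List.slice_from_one, PySem.List.foldl_append_singleton_eq_map]
  cases queries with
  | nil => simp [PySem.List.pyRange_one_eq_nil]
  | cons q0 rest =>
    have hnd := PySem.List.nodup_dedup (vocDoc.map Prod.fst)
    set voc := PySem.List.dedup (vocDoc.map Prod.fst) with hvoc
    have hL : (((q0 :: rest).length : Nat) : Int) = 1 + ((rest.length : Nat) : Int) := by
      push_cast [List.length_cons]; ring
    rw [hL]
    have h1 : (1 : Int) + ((rest.length : Nat) : Int) - 1 = ((rest.length : Nat) : Int) := by ring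
    rw [h1]
    have hrow0 : (PySem.List.pyRange 0 ((voc.length : Nat) : Int)).map (fun _ => (0 : Int))
        = voc.map (fun _ => (0 : Int)) := by
      rw [List.map_const', List.map_const', PySem.List.length_pyRange_one]
      simp
    rw [hrow0]
    have hinit : (PySem.List.pyRange 0 ((rest.length : Nat) : Int)).map
          (fun _ => voc.map (fun _ => (0 : Int)))
        = List.replicate rest.length (voc.map (fun _ => (0 : Int))) := by
      rw [List.map_const', PySem.List.length_pyRange_one]
      simp
    rw [hinit]
    rw [outer (q0 :: rest) voc hnd rest.length (by simp) rest.length (le_refl _)]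
    simp only [List.drop_succ_cons, List.drop_zero, List.take_length, Nat.sub_self,
      List.replicate_zero, List.append_nil, List.tail_cons]
    simp only [ofList_contains, decide_eq_true_eq]
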